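-- pv_equiv track=rewrite | github.com/fenre/splunk-monitoring-use-cases | scripts/archive/uc_markdown_io.py | _split_title_and_clause_hint
-- ===== SOURCE A (Python) =====
-- from typing import Dict, List, Optional, Tuple
--
-- def _split_title_and_clause_hint(title_with_clause: str) -> Tuple[str, Optional[str]]:
--     """Extract a trailing parenthesised clause hint, if present.
--
--     ``"GDPR PII Detection in Application Log Data (Art. 5/6)"`` -> ("GDPR PII
--     Detection in Application Log Data", "Art. 5/6").
--     """
--
--     s = title_with_clause.rstrip()
--     if not s.endswith(")"):
--         return s, None
--
--     depth = 0
--     open_idx = -1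
--     for idx in range(len(s) - 1, -1, -1):
--         ch = s[idx]
--         if ch == ")":
--             depth += 1
--         elif ch == "(":
--             depth -= 1
--             if depth == 0:
--                 open_idx = idx
--                 break
--     if open_idx == -1:
--         return s, None
--     title = s[:open_idx].rstrip()
--     hint = s[open_idx + 1 : -1].strip()
--     return title, hint
-- ===== SOURCE B (Python) =====
-- from typing import Dict, List, Optional, Tuple
--
-- def _split_title_and_clause_hint(title_with_clause: str) -> Tuple[str, Optional[str]]:
--     """Extract a trailing parenthesised clause hint, if present.
--
--     Counting formulation: the opening parenthesis matching the final closing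
--     one is the last index holding an opening parenthesis whose prefix balance
--     (closers minus openers before it) equals the whole string's balance,
--     found in one forward pass after two counts.
--     """
--
--     s = title_with_clause.rstrip()
--     if not s.endswith(")"):
--         return s, None
--
--     delta = s.count(")") - s.count("(")
--     bal = 0
--     open_idx = None
--     for idx, ch in enumerate(s):
--         if ch == "(":
--             if bal == delta:
--                 open_idx = idx
--             bal -= 1
--         elif ch == ")":
--             bal += 1
--     if open_idx is None:
--         return s, None
--     title = s[:open_idx].rstrip()
--     hint = s[open_idx + 1 : -1].strip()
--     return title, hint
-- ===== Notes on version B (the rewrite author's own statement) =====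
-- stated objective: alternative
-- what changed: Replaces A's backward scan with a running depth counter and -1 sentinel by a counting formulation: B precomputes the whole string's parenthesis balance with two str.count calls and then, in one forward pass tracking the prefix balance, records the last opening parenthesis whose prefix balance equals that total (None meaning no match).
import Mathlib
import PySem

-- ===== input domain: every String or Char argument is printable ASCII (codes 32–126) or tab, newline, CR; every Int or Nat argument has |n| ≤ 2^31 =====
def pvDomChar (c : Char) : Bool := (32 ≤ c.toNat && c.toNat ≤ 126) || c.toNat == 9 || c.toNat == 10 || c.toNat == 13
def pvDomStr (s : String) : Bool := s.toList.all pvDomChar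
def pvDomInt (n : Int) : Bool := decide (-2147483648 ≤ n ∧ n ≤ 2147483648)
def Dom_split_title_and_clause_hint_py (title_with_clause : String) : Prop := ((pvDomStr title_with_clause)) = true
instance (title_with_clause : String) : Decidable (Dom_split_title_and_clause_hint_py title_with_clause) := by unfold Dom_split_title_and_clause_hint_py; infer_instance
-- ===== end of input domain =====

-- B replaces A's backward depth-counter scan by a counting formulation: the matching '('
-- is the last one whose prefix balance equals the whole string's balance (two str.count
-- calls plus one forward pass); objective: alternative decomposition, same O(n) cost.

-- ===== PORT A =====
-- A's `for idx in range(len(s)-1,-1,-1): ch = s[idx]` visits exactly the (index, char)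
-- pairs of (enumerate s.toList).reverse (every idx is in range, so s[idx] never raises);
-- ported as recursion over that reversed enumerated list — exact on all inputs.
def aLoop : List (Int × Char) → Int → Int
  | [], _ => -1
  | (i, ch) :: rest, depth =>
    if ch = ')' then aLoop rest (depth + 1)
    else if ch = '(' then
      (if depth - 1 = 0 then i else aLoop rest (depth - 1))
    else aLoop rest depth

def split_title_and_clause_hint_py (title_with_clause : String) : String × Option String :=
  let s := PySem.Str.rstrip title_with_clause
  if ¬ (PySem.Str.endswith s ")" = true) then (s, none)
  else
    let open_idx := aLoop (PySem.List.enumerate s.toList 0).reverse 0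
    if open_idx = -1 then (s, none)
    else
      (PySem.Str.rstrip (PySem.Str.slice s none (some open_idx)),
       some (PySem.Str.strip (PySem.Str.slice s (some (open_idx + 1)) (some (-1)))))

-- ===== PORT B =====
-- forward pass of Source B: `bal` is the running prefix balance (#')' − #'(' before idx),
-- `oi` the last '(' index whose prefix balance equalled delta (None → none)
def bLoop : List (Int × Char) → Option Int × Int → Int → Option Int × Int
  | [], st, _ => st
  | (i, ch) :: rest, (oi, bal), delta =>
    if ch = '(' then bLoop rest ((if bal = delta then some i else oi), bal - 1) delta
    else if ch = ')' then bLoop rest (oi, bal + 1) delta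
    else bLoop rest (oi, bal) delta

def split_title_and_clause_hint_py_alt (title_with_clause : String) : String × Option String :=
  let s := PySem.Str.rstrip title_with_clause
  if ¬ (PySem.Str.endswith s ")" = true) then (s, none)
  else
    let delta : Int := (PySem.Str.count s ")" : Int) - (PySem.Str.count s "(" : Int)
    match (bLoop (PySem.List.enumerate s.toList 0) (none, 0) delta).1 with
    | none => (s, none)
    | some open_idx =>
      (PySem.Str.rstrip (PySem.Str.slice s none (some open_idx)),
       some (PySem.Str.strip (PySem.Str.slice s (some (open_idx + 1)) (some (-1)))))

-- ===== PRECONDITION & SPEC =====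
def Spec_split_title_and_clause_hint_py (title_with_clause : String) (out : String × Option String) : Prop := out = split_title_and_clause_hint_py_alt title_with_clause
instance (title_with_clause : String) (out : String × Option String) : Decidable (Spec_split_title_and_clause_hint_py title_with_clause out) := by unfold Spec_split_title_and_clause_hint_py; infer_instance

-- ===== CLAIM (what is proved, stated in full; the proofs are below) =====
def Claim_equal_split_title_and_clause_hint_py : Prop := ∀ (title_with_clause : String), Dom_split_title_and_clause_hint_py title_with_clause → Spec_split_title_and_clause_hint_py title_with_clause (split_title_and_clause_hint_py title_with_clause)

-- ===== LEMMAS AND PROOFS =====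

-- proof-side version of A's backward scan returning an Option instead of the -1 sentinel
def specR : List (Int × Char) → Int → Option Int
  | [], _ => none
  | (i, ch) :: rest, depth =>
    if ch = ')' then specR rest (depth + 1)
    else if ch = '(' then
      (if depth - 1 = 0 then some i else specR rest (depth - 1))
    else specR rest depth

-- balance #')' − #'(' of the characters of an enumerated list
def cnt : List (Int × Char) → Int
  | [] => 0
  | (_, ch) :: rest => (if ch = ')' then 1 else if ch = '(' then -1 else 0) + cnt rest

theorem aLoop_eq_specR (l : List (Int × Char)) : ∀ d, aLoop l d = (specR l d).getD (-1) := by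
  induction l with
  | nil => intro d; simp [aLoop, specR]
  | cons p rest ih =>
    intro d
    obtain ⟨i, ch⟩ := p
    by_cases h2 : ch = ')'
    · simp [aLoop, specR, h2, ih]
    · by_cases h1 : ch = '('
      · by_cases hd : d - 1 = 0 <;> simp [aLoop, specR, h1, hd, ih]
      · simp [aLoop, specR, h1, h2, ih]

theorem cnt_append (l₁ l₂ : List (Int × Char)) : cnt (l₁ ++ l₂) = cnt l₁ + cnt l₂ := by
  induction l₁ with
  | nil => simp [cnt]
  | cons p rest ih => obtain ⟨i, ch⟩ := p; simp [cnt, ih]; ring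

theorem bLoop_snd (l : List (Int × Char)) : ∀ oi b δ, (bLoop l (oi, b) δ).2 = b + cnt l := by
  induction l with
  | nil => intro oi b δ; simp [bLoop, cnt]
  | cons p rest ih =>
    intro oi b δ
    obtain ⟨i, ch⟩ := p
    by_cases h1 : ch = '('
    · simp [bLoop, cnt, h1, ih]; ring
    · by_cases h2 : ch = ')'
      · simp [bLoop, cnt, h2, ih]; ring
      · simp [bLoop, cnt, h1, h2, ih]

theorem bLoop_append (l₁ l₂ : List (Int × Char)) : ∀ st δ,
    bLoop (l₁ ++ l₂) st δ = bLoop l₂ (bLoop l₁ st δ) δ := by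
  induction l₁ with
  | nil => intro st δ; simp [bLoop]
  | cons p rest ih =>
    intro st δ
    obtain ⟨i, ch⟩ := p
    obtain ⟨oi, b⟩ := st
    by_cases h1 : ch = '(' <;> by_cases h2 : ch = ')' <;> simp [bLoop, h1, h2, ih]

-- the key correspondence: B's forward counting pass finds exactly the index found by
-- A's backward depth scan, the not-found case falling back to the accumulator
theorem bLoop_eq_specR (e : List (Int × Char)) : ∀ oi b δ,
    (bLoop e (oi, b) δ).1 = (specR e.reverse (δ - b - cnt e)).or oi := by
  induction e using List.reverseRecOn with
  | nil => intro oi b δ; simp [bLoop, specR]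
  | append_singleton e' p ih =>
    intro oi b δ
    obtain ⟨i, ch⟩ := p
    rw [bLoop_append, List.reverse_append, List.reverse_singleton, List.singleton_append,
      cnt_append]
    rcases hb : bLoop e' (oi, b) δ with ⟨oi', b'⟩
    have hsnd : b' = b + cnt e' := by
      have h := bLoop_snd e' oi b δ; rw [hb] at h; exact h
    have hoi' : oi' = (specR e'.reverse (δ - b - cnt e')).or oi := by
      have h := ih oi b δ; rw [hb] at h; exact h
    by_cases h1 : ch = '('
    · subst h1
      have hL : (bLoop [(i, '(')] (oi', b') δ).1 = if b' = δ then some i else oi' := by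
        simp [bLoop]
      have hR : specR ((i, '(') :: e'.reverse) (δ - b - (cnt e' + cnt [(i, '(')]))
          = if δ - b - (cnt e' + cnt [(i, '(')]) - 1 = 0 then some i
            else specR e'.reverse (δ - b - (cnt e' + cnt [(i, '(')]) - 1) := by
        simp [specR, cnt]
      rw [hL, hR]
      by_cases hbd : b' = δ
      · rw [if_pos hbd, if_pos (by simp [cnt]; omega)]
        simp
      · rw [if_neg hbd, if_neg (by simp [cnt]; omega),
          show δ - b - (cnt e' + cnt [(i, '(')]) - 1 = δ - b - cnt e' by simp [cnt]; ring,
          hoi']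
    · by_cases h2 : ch = ')'
      · subst h2
        have hL : (bLoop [(i, ')')] (oi', b') δ).1 = oi' := by simp [bLoop]
        have hR : specR ((i, ')') :: e'.reverse) (δ - b - (cnt e' + cnt [(i, ')')]))
            = specR e'.reverse (δ - b - (cnt e' + cnt [(i, ')')]) + 1) := by
          simp [specR]
        rw [hL, hR, show δ - b - (cnt e' + cnt [(i, ')')]) + 1 = δ - b - cnt e' by
          simp [cnt]; ring, hoi']
      · have hL : (bLoop [(i, ch)] (oi', b') δ).1 = oi' := by simp [bLoop, h1, h2]
        have hR : specR ((i, ch) :: e'.reverse) (δ - b - (cnt e' + cnt [(i, ch)]))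
            = specR e'.reverse (δ - b - (cnt e' + cnt [(i, ch)])) := by
          simp [specR, h1, h2]
        rw [hL, hR, show δ - b - (cnt e' + cnt [(i, ch)]) = δ - b - cnt e' by
          simp [cnt, h1, h2], hoi']

theorem specR_mem (l : List (Int × Char)) : ∀ d i, specR l d = some i → ∃ c, (i, c) ∈ l := by
  induction l with
  | nil => intro d i h; simp [specR] at h
  | cons p rest ih =>
    intro d i h
    obtain ⟨j, ch⟩ := p
    rw [specR] at h
    split_ifs at h
    · rcases ih _ _ h with ⟨c, hc⟩; exact ⟨c, List.mem_cons_of_mem _ hc⟩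
    · obtain rfl : j = i := Option.some.inj h
      exact ⟨ch, by simp⟩
    · rcases ih _ _ h with ⟨c, hc⟩; exact ⟨c, List.mem_cons_of_mem _ hc⟩
    · rcases ih _ _ h with ⟨c, hc⟩; exact ⟨c, List.mem_cons_of_mem _ hc⟩

theorem countChar_go (c : Char) : ∀ fuel cs acc, cs.length ≤ fuel →
    PySem.Chars.count.go [c] fuel cs acc = acc + cs.count c := by
  intro fuel
  induction fuel with
  | zero =>
    intro cs acc h
    have hnil : cs = [] := List.eq_nil_of_length_eq_zero (Nat.le_zero.mp h)
    subst hnil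
    rw [PySem.Chars.count.go]
    simp
  | succ n ih =>
    intro cs acc h
    cases cs with
    | nil =>
      rw [PySem.Chars.count.go]
      simp
      omega
    | cons c' t =>
      rw [PySem.Chars.count.go]
      simp only [List.isPrefixOf]
      by_cases hc : c = c'
      · subst hc
        simp only [BEq.rfl, Bool.true_and]
        rw [if_pos trivial,
          show List.drop [c].length (c :: t) = t from rfl,
          ih t (acc + 1) (by simpa using h), List.count_cons]
        simp
        omega
      · rw [if_neg (by simp [hc]), ih t acc (by simpa using h), List.count_cons]
        simp
        exact fun hcc => hc hcc.symm

theorem countChar (cs : List Char) (c : Char) : PySem.Chars.count cs [c] = cs.count c := by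
  unfold PySem.Chars.count
  simp [countChar_go c cs.length cs 0 le_rfl]

theorem cnt_enumerate (cs : List Char) : ∀ s : Int,
    cnt (PySem.List.enumerate cs s) = (cs.count ')' : Int) - (cs.count '(' : Int) := by
  induction cs with
  | nil => intro s; simp [PySem.List.enumerate, cnt]
  | cons c t ih =>
    intro s
    rw [PySem.List.enumerate_cons]
    by_cases h2 : c = ')'
    · subst h2
      simp [cnt, ih]
      try push_cast
      try omega
    · by_cases h1 : c = '('
      · subst h1
        simp [cnt, ih]
        try push_cast
        try omega
      · have e1 : (c == ')') = false := by simp [h2]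
        have e2 : (c == '(') = false := by simp [h1]
        simp [cnt, if_neg h2, if_neg h1, ih, List.count_cons, e1, e2]

theorem main_eq (t : String) :
    split_title_and_clause_hint_py t = split_title_and_clause_hint_py_alt t := by
  unfold split_title_and_clause_hint_py split_title_and_clause_hint_py_alt
  by_cases hend : PySem.Str.endswith (PySem.Str.rstrip t) ")" = true
  · simp only [if_neg (not_not_intro hend)]
    set s := PySem.Str.rstrip t with hs
    set e := PySem.List.enumerate s.toList 0 with he
    have hδ : ((PySem.Str.count s ")" : Int) - (PySem.Str.count s "(" : Int)) = cnt e := by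
      show ((PySem.Chars.count s.toList ")".toList : Int)
          - (PySem.Chars.count s.toList "(".toList : Int)) = cnt e
      rw [show ")".toList = [')'] from rfl, show "(".toList = ['('] from rfl,
        countChar, countChar, he, cnt_enumerate]
    have hB : (bLoop e (none, 0)
          ((PySem.Str.count s ")" : Int) - (PySem.Str.count s "(" : Int))).1
        = specR e.reverse 0 := by
      rw [bLoop_eq_specR, hδ]
      simp
    rw [aLoop_eq_specR, hB]
    cases htop : specR e.reverse 0 with
    | none => simp
    | some i =>
      have hnn : (0 : Int) ≤ i := by
        rcases specR_mem _ _ _ htop with ⟨c, hc⟩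
        rw [List.mem_reverse, he] at hc
        rcases (PySem.List.mem_enumerate_iff _ _ _).mp hc with ⟨k, hk, hik⟩
        have h0 : i = (0 : Int) + k := congrArg Prod.fst hik
        omega
      simp only [Option.getD_some]
      rw [if_neg (show ¬ (i = -1) by omega)]
  · simp only [if_pos hend]

-- ===== VERDICT (by name: the statement is the Claim_ definition above) =====
theorem split_title_and_clause_hint_py_spec : Claim_equal_split_title_and_clause_hint_py := by
  intro t _
  unfold Spec_split_title_and_clause_hint_py
  exact main_eq t
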